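/- GENERATED by farm/mkstatement.py from design/units.tsv (unit `bit_reverse`) and the Specs of Vorbis/Spec/*.lean — do not edit.
   THE STATEMENT of the proof unit `bit_reverse`: the function `bit_reverse` (26 instructions) satisfies its contract,
   given the contracts of its callees. What the names mean: Vorbis/Spec/Basic.lean. The theorem to prove:
   `theorem bit_reverse_ok : Vorbis.Spec.bit_reverse.Statement`. -/
import Vorbis.Spec.Leaves2
namespace Vorbis.Spec.bit_reverse
open X86 X86.User Asan

/-- The statement of unit `bit_reverse`. -/
def Statement : Prop :=
  ∀ (Lay : Layout) (_hLay : Lay.hi = 0x1000000) (μ : Microarch) (_hμ : UserX.MicroOK μ) (u₀ : State)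
    (_hcode : HasCodeNat Lay u₀ Vorbis.L.bit_reverse.entry Vorbis.Code.code_bit_reverse.nat Vorbis.L.bit_reverse.size),
    ∀ (others : List Obj) (frames : List (Nat × FrameLayout)), Calls Lay μ Vorbis.WayInv (Vorbis.conv u₀) Vorbis.L.bit_reverse.entry (Vorbis.Spec.bit_reverse.spec others frames)

end Vorbis.Spec.bit_reverse
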